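-- pv_equiv track=rewrite | github.com/Ritanlisa/Nanite-Tokenizers | rag/document_docx.py | _map_target_to_source_pages
-- ===== SOURCE A (Python) =====
-- from typing import Any, Dict, List, Optional
--
-- def _map_target_to_source_pages(source_count: int, target_count: int) -> List[int]:
--     src = max(1, int(source_count or 1))
--     dst = max(1, int(target_count or 1))
--     mapping: List[int] = []
--     for idx in range(dst):
--         start = int((idx * src) // dst)
--         mapping.append(min(src, max(1, start + 1)))
--     return mapping
-- ===== SOURCE B (Python) =====
-- from typing import List
--
-- def _map_target_to_source_pages(source_count: int, target_count: int) -> List[int]: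
--     src = max(1, int(source_count or 1))
--     dst = max(1, int(target_count or 1))
--     mapping: List[int] = []
--     t = 0
--     while t < dst:
--         s = (t * src) // dst + 1                # source page for target index t
--         t_next = -((-s * dst) // src)           # ceil(s*dst/src): first target index past page s
--         mapping.extend([s] * (t_next - t))      # the whole run of targets mapped to page s
--         t = t_next
--     return mapping
-- ===== Notes on version B (the rewrite author's own statement) =====
-- stated objective: alternative
-- what changed: A divides once per target index; B walks the target indices run by run, computing each run's source page and its extent with ceiling division and emitting the whole run at once, so the loop performs O(min(src,dst)) divisions instead of O(dst).
import Mathlib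
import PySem

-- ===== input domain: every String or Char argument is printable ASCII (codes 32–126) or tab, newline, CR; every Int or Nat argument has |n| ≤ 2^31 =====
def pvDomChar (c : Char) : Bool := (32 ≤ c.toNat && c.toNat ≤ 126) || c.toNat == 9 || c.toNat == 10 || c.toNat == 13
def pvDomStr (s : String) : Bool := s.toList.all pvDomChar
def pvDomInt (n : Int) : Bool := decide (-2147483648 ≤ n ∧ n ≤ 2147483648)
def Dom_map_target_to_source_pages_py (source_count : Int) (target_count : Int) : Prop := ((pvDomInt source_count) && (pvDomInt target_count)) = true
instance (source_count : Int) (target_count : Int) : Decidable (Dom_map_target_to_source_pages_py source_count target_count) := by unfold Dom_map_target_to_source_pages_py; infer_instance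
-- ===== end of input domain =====

-- B replaces A's per-target-index division loop by a run-length construction: it walks the
-- target indices run by run (one loop iteration per emitted run, computed with ceiling
-- division) instead of dividing once per target index; objective: alternative decomposition.

-- ===== PORT A =====
def map_target_to_source_pages_py (source_count : Int) (target_count : Int) : List Int :=
  let src : Int := max 1 (if source_count = 0 then 1 else source_count)
  let dst : Int := max 1 (if target_count = 0 then 1 else target_count)
  (PySem.List.pyRange 0 dst 1).foldl
    (fun mapping idx =>
      let start := PySem.Int.floordiv (idx * src) dst
      mapping ++ [min src (max 1 (start + 1))]) []

-- ===== PORT B =====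
-- the 'while t < dst' loop of Source B; fuel = dst.toNat only makes it total (each step t strictly grows)
def pvAltLoop (src dst : Int) (fuel : Nat) (t : Int) (mapping : List Int) : List Int :=
  match fuel with
  | 0 => mapping
  | fuel + 1 =>
    if t < dst then
      let s := PySem.Int.floordiv (t * src) dst + 1
      let tnext := -(PySem.Int.floordiv (-(s * dst)) src)
      pvAltLoop src dst fuel tnext (mapping ++ List.replicate (tnext - t).toNat s)
    else mapping

def map_target_to_source_pages_py_alt (source_count : Int) (target_count : Int) : List Int :=
  let src : Int := max 1 (if source_count = 0 then 1 else source_count)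
  let dst : Int := max 1 (if target_count = 0 then 1 else target_count)
  pvAltLoop src dst dst.toNat 0 []

-- ===== PRECONDITION & SPEC =====
def Spec_map_target_to_source_pages_py (source_count : Int) (target_count : Int) (out : List Int) : Prop := out = map_target_to_source_pages_py_alt source_count target_count
instance (source_count : Int) (target_count : Int) (out : List Int) : Decidable (Spec_map_target_to_source_pages_py source_count target_count out) := by unfold Spec_map_target_to_source_pages_py; infer_instance

-- ===== CLAIM (what is proved, stated in full; the proofs are below) =====
def Claim_equal_map_target_to_source_pages_py : Prop := ∀ (source_count : Int) (target_count : Int), Dom_map_target_to_source_pages_py source_count target_count → Spec_map_target_to_source_pages_py source_count target_count (map_target_to_source_pages_py source_count target_count)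

-- ===== LEMMAS AND PROOFS =====

-- B's loop produces exactly the per-index map over the remaining target indices
lemma pvAltLoop_eq (src dst : Int) (hs : 0 < src) (hd : 0 < dst) :
    ∀ (fuel : Nat) (t : Int) (acc : List Int), 0 ≤ t → (dst - t).toNat ≤ fuel →
      pvAltLoop src dst fuel t acc
        = acc ++ (PySem.List.pyRange t dst 1).map
            (fun idx => PySem.Int.floordiv (idx * src) dst + 1) := by
  intro fuel
  induction fuel with
  | zero =>
    intro t acc ht hfuel
    have hdt : dst ≤ t := by omega
    simp [pvAltLoop, PySem.List.pyRange_one_eq_nil hdt]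
  | succ fuel ih =>
    intro t acc ht hfuel
    by_cases htd : t < dst
    · set q := PySem.Int.floordiv (t * src) dst with hqdef
      obtain ⟨hlow, hhigh⟩ :=
        (PySem.Int.floordiv_eq_iff_of_pos (a := t * src) (b := dst) (q := q) hd).mp rfl
      -- hlow : q * dst ≤ t * src ; hhigh : t * src < (q+1) * dst
      set hi := -(PySem.Int.floordiv (-((q + 1) * dst)) src) with hhidef
      obtain ⟨hc1, hc2⟩ :=
        (PySem.Int.neg_floordiv_neg_eq_iff_of_pos (a := (q + 1) * dst) (b := src)
          (q := hi) hs).mp rfl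
      -- hc1 : (hi - 1) * src < (q+1) * dst ; hc2 : (q+1) * dst ≤ hi * src
      have hthi : t < hi := by
        by_contra hcon
        rw [not_lt] at hcon
        have h1 : hi * src ≤ t * src := mul_le_mul_of_nonneg_right hcon (le_of_lt hs)
        linarith
      have hqlt : q < src := by
        have h1 : t * src < dst * src := mul_lt_mul_of_pos_right htd hs
        have h2 : q * dst < src * dst := by linarith [mul_comm dst src]
        exact lt_of_mul_lt_mul_right h2 (le_of_lt hd)
      have hhid : hi ≤ dst := by
        have h1 : (q + 1) * dst ≤ src * dst := mul_le_mul_of_nonneg_right (by omega) (le_of_lt hd)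
        have h2 : (hi - 1) * src < dst * src := by linarith [mul_comm src dst]
        have h3 : hi - 1 < dst := lt_of_mul_lt_mul_right h2 (le_of_lt hs)
        omega
      have hconst : ∀ idx ∈ PySem.List.pyRange t hi 1,
          PySem.Int.floordiv (idx * src) dst + 1 = q + 1 := by
        intro idx hidx
        rw [PySem.List.mem_pyRange_one] at hidx
        obtain ⟨h1, h2⟩ := hidx
        have hA : q * dst ≤ idx * src :=
          le_trans hlow (mul_le_mul_of_nonneg_right h1 (le_of_lt hs))
        have hB : idx * src < (q + 1) * dst := by
          have h3 : idx * src ≤ (hi - 1) * src :=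
            mul_le_mul_of_nonneg_right (by omega) (le_of_lt hs)
          linarith
        have hq : PySem.Int.floordiv (idx * src) dst = q :=
          (PySem.Int.floordiv_eq_iff_of_pos hd).mpr ⟨hA, hB⟩
        omega
      have hsplitR := PySem.List.pyRange_one_append t hi dst (le_of_lt hthi) hhid
      have hrepl : (PySem.List.pyRange t hi 1).map
          (fun idx => PySem.Int.floordiv (idx * src) dst + 1)
          = List.replicate (hi - t).toNat (q + 1) := by
        have hlen : ((PySem.List.pyRange t hi 1).map
            (fun idx => PySem.Int.floordiv (idx * src) dst + 1)).length = (hi - t).toNat := by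
          simp [PySem.List.length_pyRange_one]
        rw [← hlen]
        apply List.eq_replicate_of_mem
        intro b hb
        rw [List.mem_map] at hb
        obtain ⟨idx, hidx, hbeq⟩ := hb
        rw [← hbeq]
        exact hconst idx hidx
      have hrec := ih hi (acc ++ List.replicate (hi - t).toNat (q + 1)) (by omega) (by omega)
      simp only [pvAltLoop, if_pos htd]
      rw [← hqdef, ← hhidef, hrec, hsplitR, List.map_append, hrepl, List.append_assoc]
    · have hdt : dst ≤ t := by omega
      simp [pvAltLoop, PySem.List.pyRange_one_eq_nil hdt, htd]

-- ===== VERDICT (by name: the statement is the Claim_ definition above) =====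
theorem map_target_to_source_pages_py_spec : Claim_equal_map_target_to_source_pages_py := by
  intro source_count target_count _
  unfold Spec_map_target_to_source_pages_py
  unfold map_target_to_source_pages_py map_target_to_source_pages_py_alt
  set src : Int := max 1 (if source_count = 0 then 1 else source_count) with hsrc
  set dst : Int := max 1 (if target_count = 0 then 1 else target_count) with hdst
  have hs : 0 < src := by rw [hsrc]; exact lt_of_lt_of_le zero_lt_one (le_max_left _ _)
  have hd : 0 < dst := by rw [hdst]; exact lt_of_lt_of_le zero_lt_one (le_max_left _ _)
  rw [pvAltLoop_eq src dst hs hd dst.toNat 0 [] le_rfl (by omega)]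
  rw [PySem.List.foldl_append_singleton_eq_map]
  simp only [List.nil_append]
  apply List.map_congr_left
  intro idx hidx
  rw [PySem.List.mem_pyRange_one] at hidx
  obtain ⟨h0, hlt⟩ := hidx
  have hstart0 : 0 ≤ PySem.Int.floordiv (idx * src) dst := by
    rw [PySem.Int.le_floordiv_iff_mul_le hd]
    simpa using mul_nonneg h0 (le_of_lt hs)
  have hstartlt : PySem.Int.floordiv (idx * src) dst < src := by
    rw [PySem.Int.floordiv_lt_iff_lt_mul hd]
    calc idx * src < dst * src := mul_lt_mul_of_pos_right hlt hs
    _ = src * dst := by ring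
  omega
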